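-- pv_equiv track=rewrite | github.com/JasonL1238/NLH-Solver | postflop_range/board_update.py | _has_gutshot_window
-- ===== SOURCE A (Python) =====
-- from typing import List, Set, Tuple
--
-- def _has_gutshot_window(ranks: List[int]) -> bool:
--     r = sorted(set(ranks))
--     if len(r) < 4:
--         return False
--     for i in range(len(r) - 3):
--         window = r[i : i + 4]
--         if window[3] - window[0] == 4 and window[3] - window[2] > 1:
--             return True
--     return False
-- ===== SOURCE B (Python) =====
-- def _has_gutshot_window(ranks):
--     s = set(ranks)
--     return any(a + 1 in s and a + 2 in s and a + 4 in s and a + 3 not in s for a in s)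
-- ===== Notes on version B (the rewrite author's own statement) =====
-- stated objective: simpler
-- what changed: Replaces the sort-dedup-and-slide-a-4-window scan with direct fixed-offset membership probes on a hash set: a is a gutshot low iff a+1,a+2,a+4 are in the set and a+3 is not, eliminating the sort.
import Mathlib
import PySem

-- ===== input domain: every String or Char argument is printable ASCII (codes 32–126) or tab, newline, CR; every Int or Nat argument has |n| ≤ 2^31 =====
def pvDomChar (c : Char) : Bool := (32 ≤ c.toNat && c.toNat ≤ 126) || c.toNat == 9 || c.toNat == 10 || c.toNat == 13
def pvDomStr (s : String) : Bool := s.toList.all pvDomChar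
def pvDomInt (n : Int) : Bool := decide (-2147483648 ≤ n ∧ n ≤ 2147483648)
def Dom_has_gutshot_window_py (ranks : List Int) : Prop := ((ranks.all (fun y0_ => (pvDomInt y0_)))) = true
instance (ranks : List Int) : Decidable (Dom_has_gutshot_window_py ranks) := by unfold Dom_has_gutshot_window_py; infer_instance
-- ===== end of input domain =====

-- B detects a gutshot window by fixed-offset set-membership probes (a,a+1,a+2,a+4 present, a+3 absent)
-- instead of A's sort-dedup-and-slide-a-4-window scan; objective: simpler.


-- ===== PORT A =====
def has_gutshot_window_py (ranks : List Int) : Bool :=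
  let r := PySem.List.sorted (PySem.Set.ofList ranks) (fun x => x) false
  if r.length < 4 then false
  else
    (PySem.List.pyRange 0 ((r.length : Int) - 3) 1).any (fun i =>
      let window := PySem.List.slice r (some i) (some (i + 4))
      decide (PySem.List.pyGetD window 3 0 - PySem.List.pyGetD window 0 0 = 4) &&
      decide (PySem.List.pyGetD window 3 0 - PySem.List.pyGetD window 2 0 > 1))

-- ===== PORT B =====
def has_gutshot_window_py_alt (ranks : List Int) : Bool :=
  let s := PySem.Set.ofList ranks
  s.any (fun a =>
    PySem.Set.contains s (a + 1) && PySem.Set.contains s (a + 2) &&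
    PySem.Set.contains s (a + 4) && !PySem.Set.contains s (a + 3))

-- ===== PRECONDITION & SPEC =====
def Spec_has_gutshot_window_py (ranks : List Int) (out : Bool) : Prop := out = has_gutshot_window_py_alt ranks
instance (ranks : List Int) (out : Bool) : Decidable (Spec_has_gutshot_window_py ranks out) := by unfold Spec_has_gutshot_window_py; infer_instance

-- ===== CLAIM (what is proved, stated in full; the proofs are below) =====
def Claim_equal_has_gutshot_window_py : Prop := ∀ (ranks : List Int), Dom_has_gutshot_window_py ranks → Spec_has_gutshot_window_py ranks (has_gutshot_window_py ranks)

-- ===== LEMMAS AND PROOFS =====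

-- strict-pairwise lists are strictly monotone in the index
theorem pv_sorted_get_lt {r : List Int} (hp : r.Pairwise (· < ·))
    {i j : Nat} (hj : j < r.length) (hij : i < j) : r[i]'(by omega) < r[j] :=
  List.pairwise_iff_get.mp hp ⟨i, by omega⟩ ⟨j, hj⟩ hij

theorem pv_sorted_get_le {r : List Int} (hp : r.Pairwise (· < ·))
    {i j : Nat} (hj : j < r.length) (hij : i ≤ j) : r[i]'(by omega) ≤ r[j] := by
  rcases Nat.lt_or_ge i j with h | h
  · exact le_of_lt (pv_sorted_get_lt hp hj h)
  · have : i = j := by omega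
    subst this; exact le_rfl

-- the "value" form of the gutshot condition
def pvGut (xs : List Int) : Prop :=
  ∃ a : Int, a ∈ xs ∧ a + 1 ∈ xs ∧ a + 2 ∈ xs ∧ a + 4 ∈ xs ∧ a + 3 ∉ xs

-- reading an element of the 4-window r[i:i+4]
theorem pv_window_get (r : List Int) (i k : Nat) (hk : k < 4) (hlen : i + 3 < r.length) :
    PySem.List.pyGetD ((r.drop i).take 4) (k : Int) 0 = r[i + k]'(by omega) := by
  rw [PySem.List.pyGetD_natCast]
  rw [List.getD_eq_getElem _ _ (by simp; omega)]
  simp [List.getElem_take, List.getElem_drop]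

-- A's sliding-window scan, over an arbitrary list r, equals the index form
theorem pv_scan_iff_idx (r : List Int) :
    ((if r.length < 4 then false
      else
        (PySem.List.pyRange 0 ((r.length : Int) - 3) 1).any (fun i =>
          let window := PySem.List.slice r (some i) (some (i + 4))
          decide (PySem.List.pyGetD window 3 0 - PySem.List.pyGetD window 0 0 = 4) &&
          decide (PySem.List.pyGetD window 3 0 - PySem.List.pyGetD window 2 0 > 1))) = true)
    ↔ ∃ i : Nat, ∃ hlen : i + 3 < r.length, r[i+3]'hlen - r[i]'(by omega) = 4 ∧
        r[i+3]'hlen - r[i+2]'(by omega) > 1 := by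
  constructor
  · intro h
    split_ifs at h with hl
    rw [List.any_eq_true] at h
    obtain ⟨x, hx, hcond⟩ := h
    rw [PySem.List.mem_pyRange_one] at hx
    obtain ⟨hx0, hx1⟩ := hx
    have hlen : x.toNat + 3 < r.length := by omega
    refine ⟨x.toNat, hlen, ?_⟩
    have hc2 : (decide (PySem.List.pyGetD (PySem.List.slice r (some x) (some (x + 4))) 3 0 -
          PySem.List.pyGetD (PySem.List.slice r (some x) (some (x + 4))) 0 0 = 4) &&
        decide (PySem.List.pyGetD (PySem.List.slice r (some x) (some (x + 4))) 3 0 -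
          PySem.List.pyGetD (PySem.List.slice r (some x) (some (x + 4))) 2 0 > 1)) = true := hcond
    have hxeq : x = ((x.toNat : Nat) : Int) := by omega
    rw [hxeq] at hc2
    have hw : PySem.List.slice r (some ((x.toNat : Nat) : Int)) (some (((x.toNat : Nat) : Int) + 4)) =
        (r.drop x.toNat).take 4 := by
      exact_mod_cast PySem.List.slice_natCast_add r x.toNat 4
    rw [hw] at hc2
    simp only [Bool.and_eq_true, decide_eq_true_eq] at hc2
    have h3 := pv_window_get r x.toNat 3 (by omega) hlen
    have h2 := pv_window_get r x.toNat 2 (by omega) hlen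
    have h0 := pv_window_get r x.toNat 0 (by omega) hlen
    norm_num at h3 h2 h0
    rw [h3, h2, h0] at hc2
    exact hc2
  · rintro ⟨i, hi, h4, hgap⟩
    have hl : ¬ r.length < 4 := by omega
    rw [if_neg hl, List.any_eq_true]
    refine ⟨(i : Int), ?_, ?_⟩
    · rw [PySem.List.mem_pyRange_one]
      constructor
      · omega
      · omega
    · show (decide (PySem.List.pyGetD (PySem.List.slice r (some (i : Int)) (some ((i : Int) + 4))) 3 0 -
          PySem.List.pyGetD (PySem.List.slice r (some (i : Int)) (some ((i : Int) + 4))) 0 0 = 4) &&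
        decide (PySem.List.pyGetD (PySem.List.slice r (some (i : Int)) (some ((i : Int) + 4))) 3 0 -
          PySem.List.pyGetD (PySem.List.slice r (some (i : Int)) (some ((i : Int) + 4))) 2 0 > 1)) = true
      have hw : PySem.List.slice r (some (i : Int)) (some ((i : Int) + 4)) =
          (r.drop i).take 4 := by
        exact_mod_cast PySem.List.slice_natCast_add r i 4
      rw [hw]
      have h3 := pv_window_get r i 3 (by omega) hi
      have h2 := pv_window_get r i 2 (by omega) hi
      have h0 := pv_window_get r i 0 (by omega) hi
      norm_num at h3 h2 h0
      simp only [Bool.and_eq_true, decide_eq_true_eq]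
      rw [h3, h2, h0]
      exact ⟨h4, hgap⟩

-- on a strictly increasing list the index form is the value form
theorem pv_idx_iff_val (r : List Int) (hp : r.Pairwise (· < ·)) :
    (∃ i : Nat, ∃ hlen : i + 3 < r.length, r[i+3]'hlen - r[i]'(by omega) = 4 ∧
        r[i+3]'hlen - r[i+2]'(by omega) > 1) ↔ pvGut r := by
  constructor
  · rintro ⟨i, hi, h4, hgap⟩
    have h01 := pv_sorted_get_lt hp (show i+1 < r.length by omega) (show i < i+1 by omega)
    have h12 := pv_sorted_get_lt hp (show i+2 < r.length by omega) (show i+1 < i+2 by omega)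
    have h23 := pv_sorted_get_lt hp (show i+3 < r.length by omega) (show i+2 < i+3 by omega)
    refine ⟨r[i]'(by omega), List.getElem_mem _, ?_, ?_, ?_, ?_⟩
    · have : r[i+1]'(by omega) = r[i]'(by omega) + 1 := by omega
      exact this ▸ List.getElem_mem _
    · have : r[i+2]'(by omega) = r[i]'(by omega) + 2 := by omega
      exact this ▸ List.getElem_mem _
    · have : r[i+3]'(by omega) = r[i]'(by omega) + 4 := by omega
      exact this ▸ List.getElem_mem _
    · intro hmem3
      obtain ⟨k, hk, hkeq⟩ := List.mem_iff_getElem.mp hmem3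
      have hk1 : i + 2 < k := by
        by_contra hle
        have := pv_sorted_get_le hp (show i+2 < r.length by omega) (show k ≤ i+2 by omega)
        omega
      have hk2 : k < i + 3 := by
        by_contra hge
        have := pv_sorted_get_le hp hk (show i+3 ≤ k by omega)
        omega
      omega
  · rintro ⟨a, ha, ha1, ha2, ha4, ha3⟩
    obtain ⟨i, hi, hieq⟩ := List.mem_iff_getElem.mp ha
    obtain ⟨j, hjlt, hjeq⟩ := List.mem_iff_getElem.mp ha1
    obtain ⟨k, hklt, hkeq⟩ := List.mem_iff_getElem.mp ha2
    obtain ⟨l, hllt, hleq⟩ := List.mem_iff_getElem.mp ha4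
    have hij : i < j := by
      by_contra h
      have := pv_sorted_get_le hp hi (show j ≤ i by omega); omega
    have hjk : j < k := by
      by_contra h
      have := pv_sorted_get_le hp hjlt (show k ≤ j by omega); omega
    have hkl : k < l := by
      by_contra h
      have := pv_sorted_get_le hp hklt (show l ≤ k by omega); omega
    have hji : j = i + 1 := by
      by_contra h
      have hlt := pv_sorted_get_lt hp (show i+1 < r.length by omega) (show i < i+1 by omega)
      have hlt2 := pv_sorted_get_lt hp hjlt (show i+1 < j by omega)
      omega
    have hkj : k = j + 1 := by
      by_contra h
      have hlt := pv_sorted_get_lt hp (show j+1 < r.length by omega) (show j < j+1 by omega)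
      have hlt2 := pv_sorted_get_lt hp hklt (show j+1 < k by omega)
      omega
    have hlk : l = k + 1 := by
      by_contra h
      have hlt := pv_sorted_get_lt hp (show k+1 < r.length by omega) (show k < k+1 by omega)
      have hlt2 := pv_sorted_get_lt hp hllt (show k+1 < l by omega)
      have : r[k+1]'(by omega) = a + 3 := by omega
      exact ha3 (this ▸ List.getElem_mem _)
    refine ⟨i, by omega, ?_, ?_⟩
    · have h3 : i + 3 = l := by omega
      simp only [h3]; omega
    · have h3 : i + 3 = l := by omega
      have h2 : i + 2 = k := by omega
      simp only [h3, h2]; omega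

-- A = true iff the value form holds over ranks
theorem pv_A_iff (ranks : List Int) : has_gutshot_window_py ranks = true ↔ pvGut ranks := by
  have h1 : has_gutshot_window_py ranks = true ↔
      pvGut (PySem.List.sorted (PySem.Set.ofList ranks) (fun x => x) false) :=
    Iff.trans (pv_scan_iff_idx _)
      (pv_idx_iff_val _ (PySem.List.sorted_ofList_pairwise_lt ranks))
  rw [h1]
  unfold pvGut
  simp only [PySem.List.mem_sorted, PySem.Set.mem_ofList]

-- B = true iff the value form holds over ranks
theorem pv_B_iff (ranks : List Int) : has_gutshot_window_py_alt ranks = true ↔ pvGut ranks := by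
  unfold has_gutshot_window_py_alt pvGut
  rw [List.any_eq_true]
  constructor
  · rintro ⟨a, ha, hc⟩
    rw [Bool.and_eq_true, Bool.and_eq_true, Bool.and_eq_true, Bool.not_eq_true'] at hc
    obtain ⟨⟨⟨h1, h2⟩, h4⟩, h3⟩ := hc
    refine ⟨a, (PySem.Set.mem_ofList _ _).mp ha,
      (PySem.Set.mem_ofList _ _).mp ((PySem.Set.contains_iff _ _).mp h1),
      (PySem.Set.mem_ofList _ _).mp ((PySem.Set.contains_iff _ _).mp h2),
      (PySem.Set.mem_ofList _ _).mp ((PySem.Set.contains_iff _ _).mp h4), ?_⟩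
    intro hm
    have hct : PySem.Set.contains (PySem.Set.ofList ranks) (a + 3) = true :=
      (PySem.Set.contains_iff _ _).mpr ((PySem.Set.mem_ofList _ _).mpr hm)
    rw [hct] at h3
    exact Bool.noConfusion h3
  · rintro ⟨a, h0, h1, h2, h4, h3⟩
    refine ⟨a, (PySem.Set.mem_ofList _ _).mpr h0, ?_⟩
    rw [Bool.and_eq_true, Bool.and_eq_true, Bool.and_eq_true, Bool.not_eq_true']
    refine ⟨⟨⟨?_, ?_⟩, ?_⟩, ?_⟩
    · exact (PySem.Set.contains_iff _ _).mpr ((PySem.Set.mem_ofList _ _).mpr h1)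
    · exact (PySem.Set.contains_iff _ _).mpr ((PySem.Set.mem_ofList _ _).mpr h2)
    · exact (PySem.Set.contains_iff _ _).mpr ((PySem.Set.mem_ofList _ _).mpr h4)
    · by_contra hne
      have hct : PySem.Set.contains (PySem.Set.ofList ranks) (a + 3) = true := by
        cases hb : PySem.Set.contains (PySem.Set.ofList ranks) (a + 3)
        · exact absurd hb hne
        · rfl
      exact h3 ((PySem.Set.mem_ofList _ _).mp ((PySem.Set.contains_iff _ _).mp hct))

-- ===== VERDICT (by name: the statement is the Claim_ definition above) =====
theorem has_gutshot_window_py_spec : Claim_equal_has_gutshot_window_py := by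
  intro ranks _
  unfold Spec_has_gutshot_window_py
  by_cases h : pvGut ranks
  · rw [(pv_A_iff ranks).mpr h, (pv_B_iff ranks).mpr h]
  · have hA : has_gutshot_window_py ranks = false := by
      rw [← Bool.not_eq_true]; exact fun hh => h ((pv_A_iff ranks).mp hh)
    have hB : has_gutshot_window_py_alt ranks = false := by
      rw [← Bool.not_eq_true]; exact fun hh => h ((pv_B_iff ranks).mp hh)
    rw [hA, hB]
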